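-- pv_equiv track=rewrite | github.com/AhmadAFS1/MuseTalk | scripts/tensorrt_export.py | parse_batch_sizes
-- ===== SOURCE A (Python) =====
-- from typing import Iterable, List
--
-- def parse_batch_sizes(raw: str) -> List[int]:
--     values = []
--     seen = set()
--     for token in raw.split(","):
--         token = token.strip()
--         if not token:
--             continue
--         try:
--             value = max(1, int(token))
--         except ValueError:
--             continue
--         if value in seen:
--             continue
--         values.append(value)
--         seen.add(value)
--     values.sort()
--     return values
-- ===== SOURCE B (Python) =====
-- def parse_batch_sizes(raw):
--     vals = []
--     for token in raw.split(","):
--         try: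
--             vals.append(max(1, int(token.strip())))
--         except ValueError:
--             pass
--     vals.sort()
--     result = []
--     prev = None
--     for v in vals:
--         if v != prev:
--             result.append(v)
--             prev = v
--     return result
-- ===== Notes on version B (the rewrite author's own statement) =====
-- stated objective: alternative
-- what changed: B keeps duplicates in the scan (no seen-set, no emptiness check), sorts the multiset, then removes duplicates in one adjacency pass over the sorted list, instead of A's on-the-fly set-membership dedup before sorting.
import Mathlib
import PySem

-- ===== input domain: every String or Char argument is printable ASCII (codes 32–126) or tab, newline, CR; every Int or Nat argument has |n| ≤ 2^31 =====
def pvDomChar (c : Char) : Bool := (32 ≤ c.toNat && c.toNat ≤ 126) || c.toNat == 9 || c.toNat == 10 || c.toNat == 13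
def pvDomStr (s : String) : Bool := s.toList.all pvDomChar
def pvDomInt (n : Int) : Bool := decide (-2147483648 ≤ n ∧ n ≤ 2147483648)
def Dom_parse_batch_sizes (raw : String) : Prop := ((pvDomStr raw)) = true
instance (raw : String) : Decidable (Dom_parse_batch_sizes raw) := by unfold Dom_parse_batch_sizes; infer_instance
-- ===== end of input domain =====

-- B keeps duplicates during the scan, sorts the full list, then removes duplicates in one adjacency pass (no seen-set); same return value.

-- ===== PORT A =====
def parse_batch_sizes (raw : String) : List Int :=
  let st := (PySem.Chars.splitOn raw.toList [',']).foldl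
    (fun (st : List Int × PySem.Set Int) token =>
      let token := PySem.Chars.strip token
      if token = [] then st
      else
        match PySem.Int.ofChars? token with
        | none => st
        | some n =>
          let value := max 1 n
          if PySem.Set.contains st.2 value then st
          else (st.1 ++ [value], PySem.Set.add st.2 value))
    ([], PySem.Set.empty)
  PySem.List.sorted st.1 (fun x => x) false

-- ===== PORT B =====
def parse_batch_sizes_alt (raw : String) : List Int :=
  let vals := (PySem.Chars.splitOn raw.toList [',']).foldl
    (fun (acc : List Int) token =>
      match PySem.Int.ofChars? (PySem.Chars.strip token) with
      | none => acc
      | some n => acc ++ [max 1 n]) []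
  let s := PySem.List.sorted vals (fun x => x) false
  (s.foldl
    (fun (st : List Int × Option Int) v =>
      if some v ≠ st.2 then (st.1 ++ [v], some v) else st)
    ([], none)).1

-- ===== PRECONDITION & SPEC =====
def Spec_parse_batch_sizes (raw : String) (out : List Int) : Prop := out = parse_batch_sizes_alt raw
instance (raw : String) (out : List Int) : Decidable (Spec_parse_batch_sizes raw out) := by unfold Spec_parse_batch_sizes; infer_instance

-- ===== CLAIM (what is proved, stated in full; the proofs are below) =====
def Claim_equal_parse_batch_sizes : Prop := ∀ (raw : String), Dom_parse_batch_sizes raw → Spec_parse_batch_sizes raw (parse_batch_sizes raw)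

-- ===== LEMMAS AND PROOFS =====

-- A's fold step, B's fold step, and B's adjacency-dedup step, named for the proofs
def pvAStep : List Int × PySem.Set Int → List Char → List Int × PySem.Set Int :=
  fun st token =>
    let token := PySem.Chars.strip token
    if token = [] then st
    else
      match PySem.Int.ofChars? token with
      | none => st
      | some n =>
        let value := max 1 n
        if PySem.Set.contains st.2 value then st
        else (st.1 ++ [value], PySem.Set.add st.2 value)

def pvBStep : List Int → List Char → List Int :=
  fun acc token =>
    match PySem.Int.ofChars? (PySem.Chars.strip token) with
    | none => acc
    | some n => acc ++ [max 1 n]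

def pvAdjStep : List Int × Option Int → Int → List Int × Option Int :=
  fun st v => if some v ≠ st.2 then (st.1 ++ [v], some v) else st

lemma pv_ofChars?_nil : PySem.Int.ofChars? [] = none := by decide

lemma pv_ofList_append_singleton (acc : List Int) (v : Int) :
    PySem.Set.ofList (acc ++ [v]) = PySem.Set.add (PySem.Set.ofList acc) v := by
  rw [PySem.Set.ofList_eq_foldl, PySem.Set.ofList_eq_foldl, List.foldl_append, List.foldl_cons,
    List.foldl_nil]

-- A's scan computes exactly the ordered dedup of B's scan, with the seen-set alongside
lemma pv_scan_eq (tokens : List (List Char)) (acc : List Int) :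
    tokens.foldl pvAStep (PySem.List.dedup acc, PySem.Set.ofList acc)
      = (PySem.List.dedup (tokens.foldl pvBStep acc),
         PySem.Set.ofList (tokens.foldl pvBStep acc)) := by
  induction tokens generalizing acc with
  | nil => rfl
  | cons token t ih =>
    simp only [List.foldl_cons]
    by_cases he : PySem.Chars.strip token = []
    · have hB : pvBStep acc token = acc := by
        simp [pvBStep, he, pv_ofChars?_nil]
      have hA : pvAStep (PySem.List.dedup acc, PySem.Set.ofList acc) token
          = (PySem.List.dedup acc, PySem.Set.ofList acc) := by
        simp [pvAStep, he]
      rw [hA, hB, ih]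
    · cases hn : PySem.Int.ofChars? (PySem.Chars.strip token) with
      | none =>
        have hB : pvBStep acc token = acc := by simp [pvBStep, hn]
        have hA : pvAStep (PySem.List.dedup acc, PySem.Set.ofList acc) token
            = (PySem.List.dedup acc, PySem.Set.ofList acc) := by
          simp [pvAStep, he, hn]
        rw [hA, hB, ih]
      | some n =>
        have hB : pvBStep acc token = acc ++ [max 1 n] := by simp [pvBStep, hn]
        have hA : pvAStep (PySem.List.dedup acc, PySem.Set.ofList acc) token
            = (PySem.List.dedup (acc ++ [max 1 n]), PySem.Set.ofList (acc ++ [max 1 n])) := by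
          by_cases hm : (max 1 n) ∈ acc
          · have hc : PySem.Set.contains (PySem.Set.ofList acc) (max 1 n) = true :=
              (PySem.Set.contains_iff _ _).2 ((PySem.Set.mem_ofList _ _).2 hm)
            simp only [pvAStep, he, hn, hc, PySem.List.dedup_eq_ofList,
              pv_ofList_append_singleton, PySem.Set.add]
            simp
          · have hc : PySem.Set.contains (PySem.Set.ofList acc) (max 1 n) = false := by
              rw [Bool.eq_false_iff]
              intro h
              exact hm ((PySem.Set.mem_ofList _ _).1 ((PySem.Set.contains_iff _ _).1 h))
            simp only [pvAStep, he, hn, hc, PySem.List.dedup_eq_ofList,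
              pv_ofList_append_singleton, PySem.Set.add]
            simp
        rw [hA, hB, ih]

-- the adjacency pass over a ≤-sorted list: strictly increasing, same members
lemma pv_adj_loop (l : List Int) (acc : List Int) (m : Int)
    (hl : l.Pairwise (· ≤ ·)) (hacc : acc.Pairwise (· < ·))
    (hub : ∀ x ∈ acc, x ≤ m) (hm : m ∈ acc) (hlb : ∀ y ∈ l, m ≤ y) :
    (l.foldl pvAdjStep (acc, some m)).1.Pairwise (· < ·) ∧
    ∀ x, x ∈ (l.foldl pvAdjStep (acc, some m)).1 ↔ x ∈ acc ∨ x ∈ l := by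
  induction l generalizing acc m with
  | nil => exact ⟨hacc, fun x => by simp⟩
  | cons v t ih =>
    have hvle : ∀ y ∈ t, v ≤ y := fun y hy => (List.pairwise_cons.1 hl).1 y hy
    have ht : t.Pairwise (· ≤ ·) := (List.pairwise_cons.1 hl).2
    by_cases hv : v = m
    · have hstep : pvAdjStep (acc, some m) v = (acc, some m) := by
        simp [pvAdjStep, hv]
      rw [List.foldl_cons, hstep]
      obtain ⟨h1, h2⟩ := ih acc m ht hacc hub hm (fun y hy => hlb y (List.mem_cons_of_mem _ hy))
      refine ⟨h1, fun x => ?_⟩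
      rw [h2]
      constructor
      · rintro (h | h)
        · exact Or.inl h
        · exact Or.inr (List.mem_cons_of_mem _ h)
      · rintro (h | h)
        · exact Or.inl h
        · rcases List.mem_cons.1 h with h | h
          · exact Or.inl (by rw [h, hv]; exact hm)
          · exact Or.inr h
    · have hmv : m < v := lt_of_le_of_ne (hlb v List.mem_cons_self) (fun h => hv h.symm)
      have hstep : pvAdjStep (acc, some m) v = (acc ++ [v], some v) := by
        simp [pvAdjStep, hv]
      rw [List.foldl_cons, hstep]
      have hacc' : (acc ++ [v]).Pairwise (· < ·) := by
        rw [List.pairwise_append]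
        exact ⟨hacc, List.pairwise_singleton _ _,
          fun x hx y hy => by
            rcases List.mem_singleton.1 hy with rfl
            exact lt_of_le_of_lt (hub x hx) hmv⟩
      have hub' : ∀ x ∈ acc ++ [v], x ≤ v := by
        intro x hx
        rcases List.mem_append.1 hx with hx | hx
        · exact le_of_lt (lt_of_le_of_lt (hub x hx) hmv)
        · rcases List.mem_singleton.1 hx with rfl; exact le_rfl
      obtain ⟨h1, h2⟩ := ih (acc ++ [v]) v ht hacc' hub'
        (List.mem_append.2 (Or.inr (List.mem_singleton.2 rfl))) hvle
      refine ⟨h1, fun x => ?_⟩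
      rw [h2]
      simp only [List.mem_append, List.mem_cons]
      tauto

lemma pv_adj_top (l : List Int) (hl : l.Pairwise (· ≤ ·)) :
    (l.foldl pvAdjStep ([], none)).1.Pairwise (· < ·) ∧
    ∀ x, x ∈ (l.foldl pvAdjStep ([], none)).1 ↔ x ∈ l := by
  cases l with
  | nil => exact ⟨List.Pairwise.nil, fun x => by simp⟩
  | cons v t =>
    have hstep : pvAdjStep ([], none) v = ([v], some v) := by simp [pvAdjStep]
    rw [List.foldl_cons, hstep]
    have ht := (List.pairwise_cons.1 hl).2
    obtain ⟨h1, h2⟩ := pv_adj_loop t [v] v ht (List.pairwise_singleton _ _)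
      (fun x hx => by rcases List.mem_singleton.1 hx with rfl; exact le_rfl)
      (List.mem_singleton.2 rfl) (fun y hy => (List.pairwise_cons.1 hl).1 y hy)
    refine ⟨h1, fun x => ?_⟩
    rw [h2]
    constructor
    · rintro (h | h)
      · exact List.mem_cons.2 (Or.inl (List.mem_singleton.1 h))
      · exact List.mem_cons_of_mem _ h
    · intro h
      rcases List.mem_cons.1 h with h | h
      · exact Or.inl (List.mem_singleton.2 h)
      · exact Or.inr h

-- key fact: sorted(dedup xs) = adjacency-dedup(sorted xs)
lemma pv_key (xs : List Int) :
    PySem.List.sorted (PySem.List.dedup xs) (fun x => x) false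
      = ((PySem.List.sorted xs (fun x => x) false).foldl pvAdjStep ([], none)).1 := by
  have hs : (PySem.List.sorted xs (fun x => x) false).Pairwise (· ≤ ·) :=
    PySem.List.sorted_pairwise xs (fun x => x)
  obtain ⟨hlt, hmem⟩ := pv_adj_top _ hs
  have hnd : ((PySem.List.sorted xs (fun x => x) false).foldl pvAdjStep ([], none)).1.Nodup :=
    List.Pairwise.imp (fun h => ne_of_lt h) hlt
  apply PySem.List.sorted_eq_of_perm_of_pairwise_lt
  · rw [List.perm_ext_iff_of_nodup hnd (PySem.List.nodup_dedup xs)]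
    intro a
    rw [hmem a, PySem.List.mem_sorted, PySem.List.mem_dedup]
  · exact hlt

-- ===== VERDICT (by name: the statement is the Claim_ definition above) =====
theorem parse_batch_sizes_spec : Claim_equal_parse_batch_sizes := by
  intro raw _
  show parse_batch_sizes raw = parse_batch_sizes_alt raw
  show PySem.List.sorted ((PySem.Chars.splitOn raw.toList [',']).foldl pvAStep
      ([], PySem.Set.empty)).1 (fun x => x) false = _
  have h0 : (([], PySem.Set.empty) : List Int × PySem.Set Int)
      = (PySem.List.dedup [], PySem.Set.ofList []) := rfl
  rw [h0, pv_scan_eq]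
  exact pv_key _
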